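-- pv_equiv track=rewrite | github.com/sib-swiss/pyrheadb | src/pyrheadb/Reaction.py | star_to_isotopic_label
-- ===== SOURCE A (Python) =====
-- def star_to_isotopic_label(rxn_smiles):
-- 	"""
-- 	Modifies the reaction SMILES to replace placeholders with isotopically labelled carbon.
-- 	This is necessary to be able to handle reaction SMILES with RXNMapper.
-- 	The order of replacements is important! '*': '[13C]' should be the last.
-- 	:param rxn_smiles: The reaction SMILES string
-- 	:return: Modified SMILES string
-- 	"""
-- 	replacements = {
-- 		'[1*:0]': '[13C]', '[1*]': '[13C]', '[2*]': '[13C]', '[3*]': '[13C]', '[4*]': '[13C]', '[5*]': '[13C]',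
-- 		'[6*]': '[13C]', '[7*]': '[13C]', '[8*]': '[13C]', '[9*]': '[13C]', '[*-]': '[13C-]',
-- 		'[*:0]': '[13C]', '*': '[13C]'
-- 	}
-- 	for old, new in replacements.items():
-- 		rxn_smiles = rxn_smiles.replace(old, new)
-- 	return rxn_smiles
-- ===== SOURCE B (Python) =====
-- def star_to_isotopic_label(rxn_smiles):
-- 	"""
-- 	Single left-to-right scan: at each position take the first placeholder
-- 	(in the same priority order as the original replacement table) that
-- 	starts there, emit its label, and skip past it; otherwise copy the char.
-- 	"""
-- 	table = [
-- 		('[1*:0]', '[13C]'), ('[1*]', '[13C]'), ('[2*]', '[13C]'),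
-- 		('[3*]', '[13C]'), ('[4*]', '[13C]'), ('[5*]', '[13C]'),
-- 		('[6*]', '[13C]'), ('[7*]', '[13C]'), ('[8*]', '[13C]'),
-- 		('[9*]', '[13C]'), ('[*-]', '[13C-]'), ('[*:0]', '[13C]'),
-- 		('*', '[13C]')
-- 	]
-- 	out = []
-- 	i = 0
-- 	n = len(rxn_smiles)
-- 	while i < n:
-- 		for pat, lab in table:
-- 			if rxn_smiles.startswith(pat, i):
-- 				out.append(lab)
-- 				i += len(pat)
-- 				break
-- 		else:
-- 			out.append(rxn_smiles[i])
-- 			i += 1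
-- 	return ''.join(out)
-- ===== Notes on version B (the rewrite author's own statement) =====
-- stated objective: alternative
-- what changed: Replaces 13 sequential whole-string str.replace passes by one left-to-right scan that at each position matches the placeholder table in priority order and emits the label directly.
import Mathlib
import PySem

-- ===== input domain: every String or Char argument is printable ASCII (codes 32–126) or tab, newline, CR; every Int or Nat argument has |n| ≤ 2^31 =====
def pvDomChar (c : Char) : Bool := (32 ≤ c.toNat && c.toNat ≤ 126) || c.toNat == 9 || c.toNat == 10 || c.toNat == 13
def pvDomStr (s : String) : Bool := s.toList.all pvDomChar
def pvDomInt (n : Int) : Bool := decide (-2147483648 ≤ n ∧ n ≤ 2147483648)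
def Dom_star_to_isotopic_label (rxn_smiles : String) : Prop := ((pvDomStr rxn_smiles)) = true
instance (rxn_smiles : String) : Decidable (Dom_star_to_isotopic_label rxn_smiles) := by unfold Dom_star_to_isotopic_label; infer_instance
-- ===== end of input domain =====

-- B replaces A's 13 sequential whole-string replace passes by ONE left-to-right scan that
-- matches the placeholder table in the same priority order at each position (objective: alternative).

-- ===== PORT A =====
def star_to_isotopic_label (rxn_smiles : String) : String :=
  let replacements : List (String × String) :=
    [("[1*:0]", "[13C]"), ("[1*]", "[13C]"), ("[2*]", "[13C]"), ("[3*]", "[13C]"),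
     ("[4*]", "[13C]"), ("[5*]", "[13C]"), ("[6*]", "[13C]"), ("[7*]", "[13C]"),
     ("[8*]", "[13C]"), ("[9*]", "[13C]"), ("[*-]", "[13C-]"), ("[*:0]", "[13C]"),
     ("*", "[13C]")]
  replacements.foldl (fun acc pr => PySem.Str.replace acc pr.1 pr.2) rxn_smiles

-- ===== PORT B =====
-- Source B's priority table, on code points: (placeholder, label)
def pvTable : List (List Char × List Char) :=
  [(['[','1','*',':','0',']'], ['[','1','3','C',']']),
   (['[','1','*',']'], ['[','1','3','C',']']),
   (['[','2','*',']'], ['[','1','3','C',']']),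
   (['[','3','*',']'], ['[','1','3','C',']']),
   (['[','4','*',']'], ['[','1','3','C',']']),
   (['[','5','*',']'], ['[','1','3','C',']']),
   (['[','6','*',']'], ['[','1','3','C',']']),
   (['[','7','*',']'], ['[','1','3','C',']']),
   (['[','8','*',']'], ['[','1','3','C',']']),
   (['[','9','*',']'], ['[','1','3','C',']']),
   (['[','*','-',']'], ['[','1','3','C','-',']']),
   (['[','*',':','0',']'], ['[','1','3','C',']']),
   (['*'], ['[','1','3','C',']'])]

theorem pvTable_fst_ne_nil : ∀ pr ∈ pvTable, pr.1.length ≠ 0 := by decide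

-- the single left-to-right scan of Source B: emit the label of the first table entry
-- that starts at the current position, else copy the character

def pvScan (s : List Char) : List Char :=
  match s with
  | [] => []
  | c :: t =>
    match h : pvTable.find? (fun pr => pr.1.isPrefixOf (c :: t)) with
    | some pr => pr.2 ++ pvScan ((c :: t).drop pr.1.length)
    | none => c :: pvScan t
termination_by s.length
decreasing_by
  · have hmem : pr ∈ pvTable := List.mem_of_find?_eq_some h
    have h1 : pr.1.length ≠ 0 := pvTable_fst_ne_nil pr hmem
    simp [List.length_drop]
    omega
  · simp

def star_to_isotopic_label_alt (rxn_smiles : String) : String :=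
  String.ofList (pvScan rxn_smiles.toList)

-- ===== PRECONDITION & SPEC =====
def Spec_star_to_isotopic_label (rxn_smiles : String) (out : String) : Prop := out = star_to_isotopic_label_alt rxn_smiles
instance (rxn_smiles : String) (out : String) : Decidable (Spec_star_to_isotopic_label rxn_smiles out) := by unfold Spec_star_to_isotopic_label; infer_instance

-- ===== CLAIM (what is proved, stated in full; the proofs are below) =====
def Claim_equal_star_to_isotopic_label : Prop := ∀ (rxn_smiles : String), Dom_star_to_isotopic_label rxn_smiles → Spec_star_to_isotopic_label rxn_smiles (star_to_isotopic_label rxn_smiles)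

-- ===== LEMMAS AND PROOFS =====

-- proof-side model of one Python str.replace pass (leftmost, non-overlapping)
def pvRepl (old new : List Char) (s : List Char) : List Char :=
  match s with
  | [] => []
  | c :: t =>
    if old.isPrefixOf (c :: t) then new ++ pvRepl old new (t.drop (old.length - 1))
    else c :: pvRepl old new t
termination_by s.length
decreasing_by
  · simp [List.length_drop]
  · simp

theorem pvRepl_pos (old new : List Char) (hold : old ≠ []) (c : Char) (t : List Char)
    (h : old <+: (c :: t)) :
    pvRepl old new (c :: t) = new ++ pvRepl old new ((c :: t).drop old.length) := by
  rw [pvRepl]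
  rw [if_pos (List.isPrefixOf_iff_prefix.mpr h)]
  obtain ⟨k, hk⟩ : ∃ k, old.length = k + 1 := by
    cases old with
    | nil => exact absurd rfl hold
    | cons a l => exact ⟨l.length, rfl⟩
  simp [hk]

theorem pvRepl_neg (old new : List Char) (c : Char) (t : List Char)
    (h : ¬ old <+: (c :: t)) :
    pvRepl old new (c :: t) = c :: pvRepl old new t := by
  rw [pvRepl]
  rw [if_neg (by simpa [List.isPrefixOf_iff_prefix] using h)]

theorem pvReplaceGo_eq (old new : List Char) (hold : old ≠ []) :
    ∀ fuel l acc, l.length ≤ fuel →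
      PySem.Chars.replace.go old new fuel l acc = acc.reverse ++ pvRepl old new l := by
  intro fuel
  induction fuel with
  | zero =>
    intro l acc hl
    have : l = [] := List.eq_nil_of_length_eq_zero (Nat.le_zero.mp hl)
    subst this
    simp [PySem.Chars.replace.go, pvRepl]
  | succ n ih =>
    intro l acc hl
    cases l with
    | nil => simp [PySem.Chars.replace.go, pvRepl]
    | cons c t =>
      rw [PySem.Chars.replace.go]
      by_cases hp : old.isPrefixOf (c :: t)
      · rw [if_pos hp]
        have hlen : ((c :: t).drop old.length).length ≤ n := by
          have h1 : 1 ≤ old.length := by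
            cases old with
            | nil => exact absurd rfl hold
            | cons a l => simp
          simp at hl ⊢
          omega
        rw [ih _ _ hlen, pvRepl_pos old new hold c t (List.isPrefixOf_iff_prefix.mp hp)]
        simp
      · rw [if_neg hp]
        have hlen : t.length ≤ n := by simp at hl; omega
        rw [ih _ _ hlen, pvRepl_neg old new c t (by simpa [List.isPrefixOf_iff_prefix] using hp)]
        simp

theorem pvReplace_eq (old new s : List Char) (hold : old ≠ []) :
    PySem.Chars.replace s old new = pvRepl old new s := by
  rw [PySem.Chars.replace]
  rw [if_neg (by simpa [List.isEmpty_iff] using hold)]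
  simpa using pvReplaceGo_eq old new hold s.length s [] le_rfl
def pvSufs : List (List Char) :=
  [['[','1','*',':','0',']'], ['1','*',':','0',']'], ['*',':','0',']'], [':','0',']'], ['0',']'], [']'],
   ['[','1','*',']'], ['1','*',']'], ['*',']'],
   ['[','2','*',']'], ['2','*',']'],
   ['[','3','*',']'], ['3','*',']'],
   ['[','4','*',']'], ['4','*',']'],
   ['[','5','*',']'], ['5','*',']'],
   ['[','6','*',']'], ['6','*',']'],
   ['[','7','*',']'], ['7','*',']'],
   ['[','8','*',']'], ['8','*',']'],
   ['[','9','*',']'], ['9','*',']'],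
   ['[','*','-',']'], ['*','-',']'], ['-',']'],
   ['[','*',':','0',']'],
   ['*']]

theorem pvBlockFree : ∀ q ∈ pvSufs, ∀ pr ∈ pvTable, ∀ (X : List Char), ¬ q <+: (pr.2 ++ X) := by
  have h2 : ∀ pr ∈ pvTable, pr.2 = ['[','1','3','C',']'] ∨ pr.2 = ['[','1','3','C','-',']'] := by decide
  intro q hq pr hpr X
  rcases h2 pr hpr with h | h <;> rw [h] <;> fin_cases hq <;> simp [List.cons_prefix_cons]

theorem pvNoCross : ∀ pr ∈ pvTable, pr.1 ≠ ['*'] → ∀ pk ∈ pvTable, pr.1 ≠ pk.1 →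
    ∀ i < pk.1.length, ∀ (X : List Char), ¬ pr.1 <+: (pk.1.drop i ++ X) := by
  intro pr hpr hstar pk hpk hne i hi X
  fin_cases hpr <;> fin_cases hpk <;>
    first
      | exact absurd rfl hne
      | exact absurd rfl hstar
      | (simp only [List.length_cons, List.length_nil] at hi; interval_cases i <;> simp [List.cons_prefix_cons])

theorem pvRepl_nil (old new : List Char) : pvRepl old new [] = [] := by
  simp [pvRepl]

theorem pvTable_fst_ne_nil' : ∀ pr ∈ pvTable, pr.1 ≠ [] := by decide
theorem pvSufs_tail_closed : ∀ q ∈ pvSufs, q.tail = [] ∨ q.tail ∈ pvSufs := by decide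
theorem pvTable_fst_mem_sufs : ∀ pr ∈ pvTable, pr.1 ∈ pvSufs := by decide

theorem pvSufPres (pr : List Char × List Char) (hpr : pr ∈ pvTable) :
    ∀ n, ∀ q ∈ pvSufs, ∀ s : List Char, s.length ≤ n →
      ¬ q <+: s → ¬ q <+: pvRepl pr.1 pr.2 s := by
  intro n
  induction n with
  | zero =>
    intro q hq s hs hqs
    have : s = [] := List.eq_nil_of_length_eq_zero (Nat.le_zero.mp hs)
    subst this; simpa [pvRepl_nil] using hqs
  | succ n ih =>
    intro q hq s hs hqs
    cases s with
    | nil => simpa [pvRepl_nil] using hqs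
    | cons c t =>
      by_cases hp : pr.1 <+: (c :: t)
      · rw [pvRepl_pos _ _ (pvTable_fst_ne_nil' pr hpr) c t hp]
        exact pvBlockFree q hq pr hpr _
      · rw [pvRepl_neg _ _ c t hp]
        intro hcon
        cases q with
        | nil => exact hqs (List.nil_prefix)
        | cons a q' =>
          rw [List.cons_prefix_cons] at hcon
          obtain ⟨rfl, hq'pre⟩ := hcon
          have hqt : ¬ q' <+: t := fun h => hqs (List.cons_prefix_cons.mpr ⟨rfl, h⟩)
          rcases pvSufs_tail_closed (a :: q') hq with h | h
          · simp at h; subst h; exact hqt (List.nil_prefix)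
          · simp only [List.tail_cons] at h
            have hlt : t.length ≤ n := by simp at hs; omega
            exact ih q' h t hlt hqt hq'pre

theorem pvRepl_push (old new : List Char) (a : List Char)
    (h : ∀ i < a.length, ∀ (X : List Char), ¬ old <+: (a.drop i ++ X)) :
    ∀ w, pvRepl old new (a ++ w) = a ++ pvRepl old new w := by
  induction a with
  | nil => simp
  | cons c a' ih =>
    intro w
    have h0 : ¬ old <+: (c :: (a' ++ w)) := by
      have := h 0 (by simp) w; simpa using this
    rw [List.cons_append, pvRepl_neg _ _ _ _ h0]
    have h' : ∀ i < a'.length, ∀ (X : List Char), ¬ old <+: (a'.drop i ++ X) := by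
      intro i hi X
      have := h (i + 1) (by simp; omega) X
      simpa using this
    rw [ih h']
    simp

theorem pvBlockNoCross : ∀ pr ∈ pvTable, ∀ pk ∈ pvTable,
    ∀ i < pk.2.length, ∀ (X : List Char), ¬ pr.1 <+: (pk.2.drop i ++ X) := by
  have h2 : ∀ pk ∈ pvTable, pk.2 = ['[','1','3','C',']'] ∨ pk.2 = ['[','1','3','C','-',']'] := by decide
  intro pr hpr pk hpk i hi X
  rcases h2 pk hpk with h | h <;> rw [h] <;> rw [h] at hi <;> fin_cases hpr <;>
    (simp only [List.length_cons, List.length_nil] at hi; interval_cases i <;> simp [List.cons_prefix_cons])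

def pvChain (L : List (List Char × List Char)) (s : List Char) : List Char :=
  L.foldl (fun acc pr => pvRepl pr.1 pr.2 acc) s

theorem pvChain_nil : ∀ L, pvChain L [] = [] := by
  intro L
  induction L with
  | nil => rfl
  | cons p L ih => simpa [pvChain, pvRepl_nil] using ih

theorem pvChain_push_char (c : Char) :
    ∀ L, (∀ pr ∈ L, pr ∈ pvTable) → ∀ t, (∀ pr ∈ L, ¬ pr.1 <+: (c :: t)) →
      pvChain L (c :: t) = c :: pvChain L t := by
  intro L
  induction L with
  | nil => intro _ t _; rfl
  | cons p L ih =>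
    intro hmem t hno
    have hp : ¬ p.1 <+: (c :: t) := hno p (by simp)
    have hstep : pvRepl p.1 p.2 (c :: t) = c :: pvRepl p.1 p.2 t := pvRepl_neg _ _ _ _ hp
    show pvChain L (pvRepl p.1 p.2 (c :: t)) = c :: pvChain L (pvRepl p.1 p.2 t)
    rw [hstep]
    apply ih (fun pr h => hmem pr (by simp [h]))
    intro pr hprL
    have := pvSufPres p (hmem p (by simp)) (c :: t).length pr.1
      (pvTable_fst_mem_sufs pr (hmem pr (by simp [hprL]))) (c :: t) le_rfl (hno pr (by simp [hprL]))
    rwa [hstep] at this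

theorem pvChain_push_pat (pk : List Char × List Char) (hpk : pk ∈ pvTable) :
    ∀ L, (∀ pr ∈ L, pr ∈ pvTable ∧ pr.1 ≠ pk.1 ∧ pr.1 ≠ ['*']) → ∀ v,
      pvChain L (pk.1 ++ v) = pk.1 ++ pvChain L v := by
  intro L
  induction L with
  | nil => intro _ v; rfl
  | cons p L ih =>
    intro hmem v
    obtain ⟨hpmem, hne, hstar⟩ := hmem p (by simp)
    have hstep := pvRepl_push p.1 p.2 pk.1 (pvNoCross p hpmem hstar pk hpk hne) v
    show pvChain L (pvRepl p.1 p.2 (pk.1 ++ v)) = pk.1 ++ pvChain L (pvRepl p.1 p.2 v)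
    rw [hstep]
    exact ih (fun pr h => hmem pr (by simp [h])) _

theorem pvChain_push_block (pk : List Char × List Char) (hpk : pk ∈ pvTable) :
    ∀ L, (∀ pr ∈ L, pr ∈ pvTable) → ∀ v,
      pvChain L (pk.2 ++ v) = pk.2 ++ pvChain L v := by
  intro L
  induction L with
  | nil => intro _ v; rfl
  | cons p L ih =>
    intro hmem v
    have hstep := pvRepl_push p.1 p.2 pk.2 (pvBlockNoCross p (hmem p (by simp)) pk hpk) v
    show pvChain L (pvRepl p.1 p.2 (pk.2 ++ v)) = pk.2 ++ pvChain L (pvRepl p.1 p.2 v)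
    rw [hstep]
    exact ih (fun pr h => hmem pr (by simp [h])) _

theorem pvTake_key : ∀ n < 13, ∀ pr ∈ pvTable.take n,
    pr.1 ≠ (pvTable.getD n (['*'], [])).1 ∧ pr.1 ≠ ['*'] := by
  intro n hn
  interval_cases n <;> decide

theorem pvScan_none (c : Char) (t : List Char)
    (hf : pvTable.find? (fun pr => pr.1.isPrefixOf (c :: t)) = none) :
    pvScan (c :: t) = c :: pvScan t := by
  rw [pvScan]
  split <;> simp_all

theorem pvScan_some (c : Char) (t : List Char) (pr : List Char × List Char)
    (hf : pvTable.find? (fun pr => pr.1.isPrefixOf (c :: t)) = some pr) :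
    pvScan (c :: t) = pr.2 ++ pvScan ((c :: t).drop pr.1.length) := by
  rw [pvScan]
  split <;> simp_all

theorem pvChain_eq_scan : ∀ n, ∀ s : List Char, s.length ≤ n → pvChain pvTable s = pvScan s := by
  intro n
  induction n with
  | zero =>
    intro s hs
    have : s = [] := List.eq_nil_of_length_eq_zero (Nat.le_zero.mp hs)
    subst this
    rw [pvChain_nil, pvScan]
  | succ n ih =>
    intro s hs
    cases s with
    | nil => rw [pvChain_nil, pvScan]
    | cons c t =>
      cases hf : pvTable.find? (fun pr => pr.1.isPrefixOf (c :: t)) with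
      | none =>
        have hall : ∀ pr ∈ pvTable, ¬ pr.1 <+: (c :: t) := by
          intro pr hpr
          have := List.find?_eq_none.mp hf pr hpr
          simpa [List.isPrefixOf_iff_prefix] using this
        rw [pvScan_none c t hf, pvChain_push_char c pvTable (fun _ h => h) t hall]
        have hlt : t.length ≤ n := by simp at hs; omega
        rw [ih t hlt]
      | some pr =>
        obtain ⟨hp, as, bs, heq, hbefore⟩ := List.find?_eq_some_iff_append.mp hf
        have hp' : pr.1 <+: (c :: t) := List.isPrefixOf_iff_prefix.mp hp
        obtain ⟨v, hv⟩ := hp'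
        have hprmem : pr ∈ pvTable := List.mem_of_find?_eq_some hf
        have hasmem : ∀ a ∈ as, a ∈ pvTable ∧ a.1 ≠ pr.1 ∧ a.1 ≠ ['*'] := by
          intro a ha
          have hamem : a ∈ pvTable := by rw [heq]; simp [ha]
          have hlen : as.length < 13 := by
            have : as.length < (as ++ pr :: bs).length := by simp
            rw [← heq] at this
            simpa [pvTable] using this
          have htake : as = pvTable.take as.length := by
            rw [heq, List.take_left]
          have hget : pvTable.getD as.length (['*'], []) = pr := by
            rw [heq]
            rw [List.getD_eq_getElem _ _ (by simp)]
            rw [List.getElem_append_right (le_refl as.length)]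
            simp
          have := pvTake_key as.length hlen a (by rw [← htake]; exact ha)
          rw [hget] at this
          exact ⟨hamem, this.1, this.2⟩
        have hbsmem : ∀ a ∈ bs, a ∈ pvTable := by
          intro a ha; rw [heq]; simp [ha]
        -- decompose the chain
        have hchain : ∀ x, pvChain pvTable x = pvChain bs (pvRepl pr.1 pr.2 (pvChain as x)) := by
          intro x
          conv_lhs => rw [heq]
          simp [pvChain, List.foldl_append]
        have hvlen : v.length ≤ n := by
          have h1 : pr.1.length ≥ 1 := by
            cases h : pr.1 with
            | nil => exact absurd h (pvTable_fst_ne_nil' pr hprmem)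
            | cons a l => simp
          have h2 : (c :: t).length = pr.1.length + v.length := by rw [← hv]; simp
          simp at h2 hs
          omega
        have hrep : pvRepl pr.1 pr.2 (pr.1 ++ pvChain as v) =
            pr.2 ++ pvRepl pr.1 pr.2 (pvChain as v) := by
          obtain ⟨a, l, hpr1⟩ : ∃ a l, pr.1 = a :: l := by
            cases h : pr.1 with
            | nil => exact absurd h (pvTable_fst_ne_nil' pr hprmem)
            | cons a l => exact ⟨a, l, rfl⟩
          rw [hpr1, List.cons_append]
          rw [pvRepl_pos _ _ (by simp) _ _ ⟨pvChain as v, by simp⟩]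
          congr 1
          simp
        rw [pvScan_some c t pr hf]
        have hdrop : (c :: t).drop pr.1.length = v := by rw [← hv, List.drop_left]
        rw [hdrop, hchain (c :: t), ← hv]
        rw [pvChain_push_pat pr hprmem as hasmem v]
        rw [hrep, pvChain_push_block pr hprmem bs hbsmem, ← hchain v, ih v hvlen]
theorem pvStrFoldl_toList (L : List (String × String)) (hL : ∀ p ∈ L, p.1.toList ≠ []) :
    ∀ s : String,
      (L.foldl (fun acc pr => PySem.Str.replace acc pr.1 pr.2) s).toList
        = pvChain (L.map (fun pr => (pr.1.toList, pr.2.toList))) s.toList := by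
  induction L with
  | nil => intro s; rfl
  | cons p L ih =>
    intro s
    have hstep : (PySem.Str.replace s p.1 p.2).toList = pvRepl p.1.toList p.2.toList s.toList := by
      rw [PySem.Str.toList_replace, pvReplace_eq _ _ _ (hL p (by simp))]
    show ((L.foldl (fun acc pr => PySem.Str.replace acc pr.1 pr.2) (PySem.Str.replace s p.1 p.2))).toList = _
    rw [ih (fun q hq => hL q (by simp [hq]))]
    show _ = pvChain ((p.1.toList, p.2.toList) :: L.map (fun pr => (pr.1.toList, pr.2.toList))) s.toList
    unfold pvChain
    rw [List.foldl_cons, hstep]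

-- bridge: port A on .toList is the pvRepl chain over the table
theorem pvA_toList (s : String) :
    (star_to_isotopic_label s).toList = pvChain pvTable s.toList := by
  unfold star_to_isotopic_label
  rw [pvStrFoldl_toList _ (by decide)]
  congr 1

-- ===== VERDICT =====
theorem star_to_isotopic_label_spec : Claim_equal_star_to_isotopic_label := by
  intro s _
  unfold Spec_star_to_isotopic_label star_to_isotopic_label_alt
  have h := pvA_toList s
  rw [pvChain_eq_scan s.toList.length s.toList le_rfl] at h
  rw [← h, String.ofList_toList]
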